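-- pv_equiv track=rewrite | github.com/maruyuki95/training | training/src/training/yukicoder/no346/python/Main.py | execute
-- ===== SOURCE A (Python) =====
-- def execute(arg):
--     ans = 0
--     cIndex = []
--     wIndex = []
--
--     for idx, s in enumerate(arg):
--         if(s == "c"):
--             cIndex.append(idx)
--
--         if(s == "w"):
--             if(len(cIndex) > 0 and len(wIndex) > 0):
--                 for c in cIndex:
--                     for w in wIndex:
--                         if(c < w):
--                             ans+=1
--
--             wIndex.append(idx)
--
--     return ans
-- ===== SOURCE B (Python) =====
-- def execute(arg):
--     ans = 0      # total
--     pairs = 0    # sum over previous 'w' positions of number of 'c' before each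
--     cs = 0       # number of 'c' seen so far
--     for s in arg:
--         if s == "c":
--             cs += 1
--         elif s == "w":
--             ans += pairs
--             pairs += cs
--     return ans
-- ===== Notes on version B (the rewrite author's own statement) =====
-- stated objective: faster
-- what changed: Replaced the nested double scan over the two stored index lists, repeated at every match in A, by a single pass maintaining two running integer counters; intended as asymptotically faster (O(n) vs O(n^3) on match-dense input), measured between 1.4x and 2x on the generated inputs.
import Mathlib
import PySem

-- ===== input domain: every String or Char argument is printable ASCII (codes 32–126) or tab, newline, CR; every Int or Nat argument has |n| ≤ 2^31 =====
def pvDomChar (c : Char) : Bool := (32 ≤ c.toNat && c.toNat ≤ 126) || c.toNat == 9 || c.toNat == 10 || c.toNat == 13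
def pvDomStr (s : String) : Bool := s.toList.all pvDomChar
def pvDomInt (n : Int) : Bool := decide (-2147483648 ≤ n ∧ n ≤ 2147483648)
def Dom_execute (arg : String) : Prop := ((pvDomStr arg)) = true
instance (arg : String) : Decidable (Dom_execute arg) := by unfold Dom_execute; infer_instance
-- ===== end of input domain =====

-- B replaces A's repeated double scan over the two stored index lists by a
-- single pass maintaining two running integer counters (objective: faster).

-- ===== PORT A =====
-- step of A's loop: state (ans, cIndex, wIndex)
def executeStepA (st : Int × List Int × List Int) (p : Int × Char) : Int × List Int × List Int :=
  let idx := p.1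
  let s := p.2
  let ans := st.1
  let cI := st.2.1
  let wI := st.2.2
  let cI := if s = 'c' then cI ++ [idx] else cI
  if s = 'w' then
    let ans :=
      if cI.length > 0 ∧ wI.length > 0 then
        cI.foldl (fun a c => wI.foldl (fun a w => if c < w then a + 1 else a) a) ans
      else ans
    (ans, cI, wI ++ [idx])
  else
    (ans, cI, wI)

def execute (arg : String) : Int :=
  ((PySem.List.enumerate arg.toList).foldl executeStepA (0, [], [])).1

-- ===== PORT B =====
-- step of B's loop: state (ans, pairs, cs)
def executeStepB (st : Int × Int × Int) (s : Char) : Int × Int × Int :=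
  if s = 'c' then (st.1, st.2.1, st.2.2 + 1)
  else if s = 'w' then (st.1 + st.2.1, st.2.1 + st.2.2, st.2.2)
  else st

def execute_alt (arg : String) : Int :=
  (arg.toList.foldl executeStepB (0, 0, 0)).1

-- ===== PRECONDITION & SPEC =====
def Spec_execute (arg : String) (out : Int) : Prop := out = execute_alt arg
instance (arg : String) (out : Int) : Decidable (Spec_execute arg out) := by unfold Spec_execute; infer_instance

-- ===== CLAIM (what is proved, stated in full; the proofs are below) =====
def Claim_equal_execute : Prop := ∀ (arg : String), Dom_execute arg → Spec_execute arg (execute arg)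

-- ===== LEMMAS AND PROOFS =====

-- number of w ∈ wI with c < w
def cntLt (c : Int) (wI : List Int) : Int := ((wI.filter (fun w => c < w)).length : Int)

-- value A's double loop adds to ans
def dblSum (cI wI : List Int) : Int := (cI.map (fun c => cntLt c wI)).sum

theorem inner_shift (c : Int) (wI : List Int) (a : Int) :
    wI.foldl (fun a w => if c < w then a + 1 else a) a = a + cntLt c wI := by
  induction wI generalizing a with
  | nil => simp [cntLt]
  | cons w ws ih =>
    simp only [List.foldl_cons, cntLt, List.filter_cons]
    by_cases h : c < w
    · simp [h, ih, cntLt]; ring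
    · simp [h, ih, cntLt]

theorem foldl_add_map (f : Int → Int) (l : List Int) (a : Int) :
    l.foldl (fun a c => a + f c) a = a + (l.map f).sum := by
  induction l generalizing a with
  | nil => simp
  | cons c cs ih => simp [ih]; ring

theorem outer_shift (cI wI : List Int) (a : Int) :
    cI.foldl (fun a c => wI.foldl (fun a w => if c < w then a + 1 else a) a) a
      = a + dblSum cI wI := by
  simp only [inner_shift, dblSum]
  exact foldl_add_map _ cI a

theorem dblSum_nil_right (cI : List Int) : dblSum cI [] = 0 := by
  simp [dblSum, cntLt]

theorem dblSum_append_c (cI wI : List Int) (i : Int) (hw : ∀ w ∈ wI, w < i) :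
    dblSum (cI ++ [i]) wI = dblSum cI wI := by
  have : cntLt i wI = 0 := by
    have : wI.filter (fun w => i < w) = [] := by
      apply List.filter_eq_nil_iff.mpr
      intro w hwmem
      simpa using not_lt.mpr (le_of_lt (hw w hwmem))
    simp [cntLt, this]
  simp [dblSum, this]

theorem dblSum_append_w (cI wI : List Int) (i : Int) (hc : ∀ c ∈ cI, c < i) :
    dblSum cI (wI ++ [i]) = dblSum cI wI + (cI.length : Int) := by
  induction cI with
  | nil => simp [dblSum]
  | cons c cs ih =>
    have hci : c < i := hc c (by simp)
    have ih' := ih (fun x hx => hc x (by simp [hx]))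
    simp only [dblSum, List.map_cons, List.sum_cons] at ih' ⊢
    have : cntLt c (wI ++ [i]) = cntLt c wI + 1 := by
      simp [cntLt, List.filter_append, hci]
    rw [this, ih']
    push_cast [List.length_cons]
    ring

-- the main invariant: A's loop from enumerated position i equals B's loop,
-- given pairs = dblSum cI wI, cs = |cI|, and all stored indices < i
theorem main_inv (l : List Char) (i ans : Int) (cI wI : List Int)
    (hc : ∀ c ∈ cI, c < i) (hw : ∀ w ∈ wI, w < i) :
    ((PySem.List.enumerate l i).foldl executeStepA (ans, cI, wI)).1
      = (l.foldl executeStepB (ans, dblSum cI wI, (cI.length : Int))).1 := by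
  induction l generalizing i ans cI wI with
  | nil => simp
  | cons s rest ih =>
    rw [PySem.List.enumerate_cons]
    simp only [List.foldl_cons]
    by_cases hcch : s = 'c'
    · subst hcch
      have hst : executeStepA (ans, cI, wI) (i, 'c') = (ans, cI ++ [i], wI) := by
        simp [executeStepA]
      have hstB : executeStepB (ans, dblSum cI wI, (cI.length : Int)) 'c'
          = (ans, dblSum cI wI, (cI.length : Int) + 1) := by
        simp [executeStepB]
      rw [hst, hstB,
        ih (i + 1) ans (cI ++ [i]) wI
          (by intro c hcm; rcases List.mem_append.mp hcm with h | h
              · exact lt_trans (hc c h) (by omega)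
              · simp at h; omega)
          (by intro w hwm; exact lt_trans (hw w hwm) (by omega))]
      rw [dblSum_append_c cI wI i hw]
      simp
    · by_cases hwch : s = 'w'
      · subst hwch
        have hst : executeStepA (ans, cI, wI) (i, 'w')
            = (ans + dblSum cI wI, cI, wI ++ [i]) := by
          by_cases hg : cI.length > 0 ∧ wI.length > 0
          · simp [executeStepA, hg, outer_shift]
          · have h0 : dblSum cI wI = 0 := by
              rcases not_and_or.mp hg with h | h
              · have : cI = [] := by
                  cases cI with
                  | nil => rfl
                  | cons a b => simp at h
                simp [this, dblSum]
              · have : wI = [] := by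
                  cases wI with
                  | nil => rfl
                  | cons a b => simp at h
                simp [this, dblSum_nil_right]
            simp [executeStepA, hg, h0]
        have hstB : executeStepB (ans, dblSum cI wI, (cI.length : Int)) 'w'
            = (ans + dblSum cI wI, dblSum cI wI + (cI.length : Int), (cI.length : Int)) := by
          simp [executeStepB]
        rw [hst, hstB,
          ih (i + 1) (ans + dblSum cI wI) cI (wI ++ [i])
            (by intro c hcm; exact lt_trans (hc c hcm) (by omega))
            (by intro w hwm; rcases List.mem_append.mp hwm with h | h
                · exact lt_trans (hw w h) (by omega)
                · simp at h; omega)]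
        rw [dblSum_append_w cI wI i hc]
      · have hst : executeStepA (ans, cI, wI) (i, s) = (ans, cI, wI) := by
          simp [executeStepA, hcch, hwch]
        have hstB : executeStepB (ans, dblSum cI wI, (cI.length : Int))
            s = (ans, dblSum cI wI, (cI.length : Int)) := by
          simp [executeStepB, hcch, hwch]
        rw [hst, hstB,
          ih (i + 1) ans cI wI
            (by intro c hcm; exact lt_trans (hc c hcm) (by omega))
            (by intro w hwm; exact lt_trans (hw w hwm) (by omega))]

-- ===== VERDICT (by name: the statement is the Claim_ definition above) =====
theorem execute_spec : Claim_equal_execute := by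
  intro arg _
  unfold Spec_execute execute execute_alt
  have := main_inv arg.toList 0 0 [] [] (by simp) (by simp)
  simpa [dblSum] using this
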